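-- pv_equiv track=rewrite | github.com/xuyanfu/RASAOpenQA | Ranker/run.py | snorm_batch_init_pre
-- ===== SOURCE A (Python) =====
-- def snorm_batch_init_pre(list_para, list_question, list_list_answer,first_N = 200):
--
--     list_p = []
--     list_q = []
--     list_p_words = []
--     list_q_words = []
--     list_list_start = []
--     list_list_end = []
--     list_y = []
--
--
--     num_total_true = 0
--     num_100 = 0
--     for para,list_answer,question in zip(list_para,list_list_answer, list_question):
--         passage_words = para.strip().split()
--         if len(passage_words) > first_N:
--             num_100 += 1
--
--         passage_words = passage_words[:first_N]
--         question_words = question.strip().split()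
--         passage = ' '.join(passage_words)
--
--
--
--
--         list_start = []
--         list_end = []
--         label_y = 0
--
--         for answer in list_answer:
--
--             if answer in passage:
--                 label_y = 1
--
--             ans_words = answer.strip().split()
--             for i in range(0, len(passage_words) - len(ans_words) + 1):
--                 if ans_words == passage_words[i: i + len(ans_words)]:
--                     if i not in list_start:
--                         list_start.append(i)
--                     tmp_end_index = i + len(ans_words) - 1
--                     if tmp_end_index not in list_end:
--                         list_end.append(tmp_end_index)
--                     num_total_true+=1
--
--         list_p.append(passage)
--         list_q.append(question)
--         list_p_words.append(passage_words)
--         list_q_words.append(question_words)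
--         list_list_start.append(list_start)
--         list_list_end.append(list_end)
--         list_y.append(label_y)
--
--     return list_p,list_q,list_p_words,list_q_words,list_list_start,list_list_end,num_total_true,list_y
-- ===== SOURCE B (Python) =====
-- def _dedup(xs):
--     out = []
--     for x in xs:
--         if x not in out:
--             out.append(x)
--     return out
--
--
-- def _matches(passage_words, index, ans_words):
--     if not ans_words:
--         return list(range(len(passage_words) + 1))
--     L = len(ans_words)
--     return [i for i in index.get(ans_words[0], []) if passage_words[i:i + L] == ans_words]
--
--
-- def _snorm_record(para, question, answers, first_N):
--     passage_words = para.strip().split()[:first_N]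
--     passage = ' '.join(passage_words)
--     index = {}
--     for i, w in enumerate(passage_words):
--         index.setdefault(w, []).append(i)
--     spans = []
--     for answer in answers:
--         ans_words = answer.strip().split()
--         L = len(ans_words)
--         spans.extend((i, i + L - 1) for i in _matches(passage_words, index, ans_words))
--     label_y = 1 if any(a in passage for a in answers) else 0
--     return (passage, question, passage_words, question.strip().split(),
--             _dedup([s for s, _ in spans]), _dedup([e for _, e in spans]),
--             len(spans), label_y)
--
--
-- def snorm_batch_init_pre(list_para, list_question, list_list_answer, first_N=200):
--     records = [_snorm_record(para, question, answers, first_N)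
--                for para, answers, question in zip(list_para, list_list_answer, list_question)]
--     return ([r[0] for r in records],
--             [r[1] for r in records],
--             [r[2] for r in records],
--             [r[3] for r in records],
--             [r[4] for r in records],
--             [r[5] for r in records],
--             sum(r[6] for r in records),
--             [r[7] for r in records])
-- ===== Notes on version B (the rewrite author's own statement) =====
-- stated objective: alternative
-- what changed: A's single stateful loop (threading eight accumulators and scanning every window per answer) is replaced by a staged pipeline: a pure per-record function that builds an inverted word-position index, collects all match spans as one flat list, dedups starts/ends and labels via any(); the batch result is then assembled by mapping that function over the records and projecting/summing columns.
import Mathlib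
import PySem

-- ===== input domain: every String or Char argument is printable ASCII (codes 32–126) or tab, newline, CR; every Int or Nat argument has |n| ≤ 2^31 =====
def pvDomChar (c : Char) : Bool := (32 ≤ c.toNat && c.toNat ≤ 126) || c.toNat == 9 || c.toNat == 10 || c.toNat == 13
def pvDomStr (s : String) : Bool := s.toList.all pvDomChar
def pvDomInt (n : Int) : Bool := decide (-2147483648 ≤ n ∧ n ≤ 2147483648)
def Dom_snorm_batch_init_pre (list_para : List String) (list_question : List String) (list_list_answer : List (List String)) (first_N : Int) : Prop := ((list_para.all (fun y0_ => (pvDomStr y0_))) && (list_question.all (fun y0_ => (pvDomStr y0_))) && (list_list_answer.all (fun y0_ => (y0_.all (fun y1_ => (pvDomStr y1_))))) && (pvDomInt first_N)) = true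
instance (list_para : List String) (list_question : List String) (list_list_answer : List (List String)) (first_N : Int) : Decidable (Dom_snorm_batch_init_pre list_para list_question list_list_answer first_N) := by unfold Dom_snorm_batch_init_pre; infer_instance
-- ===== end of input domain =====

-- B replaces A's single stateful batch loop by a staged pipeline: a pure per-record function
-- (inverted word-position index, flat span list, dedup, any()-label) mapped over the records,
-- with the batch columns obtained by projection and summation (objective: alternative).

-- ===== PORT A =====
-- state carried through A's outer loop:
-- (list_p, list_q, list_p_words, list_q_words, list_list_start, list_list_end, num_total_true, list_y, num_100)
abbrev SnormSt := List String × List String × List (List String) × List (List String) ×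
  List (List Int) × List (List Int) × Int × List Int × Int

-- 'for i in range(0, len(passage_words) - len(ans_words) + 1): if ans_words == passage_words[i:i+len(ans_words)]: …'
def aSpanLoop (passage_words ans_words : List String) (st : List Int × List Int × Int) :
    List Int × List Int × Int :=
  (PySem.List.pyRange 0 (PySem.List.len passage_words - PySem.List.len ans_words + 1) 1).foldl
    (fun st i =>
      if PySem.List.slice passage_words (some i) (some (i + PySem.List.len ans_words)) = ans_words then
        ((if i ∈ st.1 then st.1 else st.1 ++ [i]),
         (if i + PySem.List.len ans_words - 1 ∈ st.2.1 then st.2.1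
          else st.2.1 ++ [i + PySem.List.len ans_words - 1]),
         st.2.2 + 1)
      else st) st

-- body of 'for answer in list_answer:' ; st = (list_start, list_end, num_total_true, label_y)
def aAnswerStep (passage : String) (passage_words : List String)
    (st : List Int × List Int × Int × Int) (answer : String) :
    List Int × List Int × Int × Int :=
  let label_y := if PySem.Str.isIn answer passage then (1 : Int) else st.2.2.2
  let ans_words := PySem.Str.split₀ (PySem.Str.strip answer)
  let r := aSpanLoop passage_words ans_words (st.1, st.2.1, st.2.2.1)
  (r.1, r.2.1, r.2.2, label_y)

-- body of 'for para, list_answer, question in zip(...):'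
def aRecordStep (first_N : Int) (st : SnormSt) (rec : String × List String × String) : SnormSt :=
  let passage_words0 := PySem.Str.split₀ (PySem.Str.strip rec.1)
  let num_100 := if PySem.List.len passage_words0 > first_N then st.2.2.2.2.2.2.2.2 + 1
                 else st.2.2.2.2.2.2.2.2
  let passage_words := PySem.List.slice passage_words0 none (some first_N)
  let question_words := PySem.Str.split₀ (PySem.Str.strip rec.2.2)
  let passage := PySem.Str.join " " passage_words
  let r := rec.2.1.foldl (aAnswerStep passage passage_words)
    (([] : List Int), ([] : List Int), st.2.2.2.2.2.2.1, (0 : Int))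
  (st.1 ++ [passage], st.2.1 ++ [rec.2.2], st.2.2.1 ++ [passage_words],
   st.2.2.2.1 ++ [question_words], st.2.2.2.2.1 ++ [r.1], st.2.2.2.2.2.1 ++ [r.2.1],
   r.2.2.1, st.2.2.2.2.2.2.2.1 ++ [r.2.2.2], num_100)

def snorm_batch_init_pre (list_para : List String) (list_question : List String) (list_list_answer : List (List String)) (first_N : Int) : List String × List String × List (List String) × List (List String) × List (List Int) × List (List Int) × Int × List Int :=
  let final := (list_para.zip (list_list_answer.zip list_question)).foldl (aRecordStep first_N)
    ([], [], [], [], [], [], 0, [], 0)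
  (final.1, final.2.1, final.2.2.1, final.2.2.2.1, final.2.2.2.2.1, final.2.2.2.2.2.1,
   final.2.2.2.2.2.2.1, final.2.2.2.2.2.2.2.1)

-- ===== PORT B =====
-- '_dedup(xs)': order-preserving first-occurrence dedup
def bDedup (xs : List Int) : List Int :=
  xs.foldl (fun out x => if x ∈ out then out else out ++ [x]) []

-- 'index = {}; for i, w in enumerate(passage_words): index.setdefault(w, []).append(i)'
-- (setdefault+append stores get(w,[]) ++ [i], i.e. Dict.modify)
def bIndex (passage_words : List String) : PySem.Dict String (List Int) :=
  (PySem.List.enumerate passage_words 0).foldl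
    (fun d p => d.modify p.2 ([] : List Int) (fun l => l ++ [p.1])) PySem.Dict.empty

-- '_matches(passage_words, index, ans_words)'
def bMatches (idx : PySem.Dict String (List Int)) (passage_words ans_words : List String) :
    List Int :=
  match ans_words with
  | [] => PySem.List.pyRange 0 (PySem.List.len passage_words + 1) 1
  | w :: _ =>
    (idx.getD w []).filter (fun i =>
      decide (PySem.List.slice passage_words (some i) (some (i + PySem.List.len ans_words)) = ans_words))

-- '_snorm_record(para, question, answers, first_N)': a pure per-record computation
def bRecord (first_N : Int) (rec : String × List String × String) :
    String × String × List String × List String × List Int × List Int × Int × Int :=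
  let passage_words := PySem.List.slice (PySem.Str.split₀ (PySem.Str.strip rec.1)) none (some first_N)
  let passage := PySem.Str.join " " passage_words
  let idx := bIndex passage_words
  let spans := rec.2.1.flatMap (fun answer =>
    let aw := PySem.Str.split₀ (PySem.Str.strip answer)
    (bMatches idx passage_words aw).map (fun i => (i, i + PySem.List.len aw - 1)))
  let label_y : Int := if rec.2.1.any (fun a => PySem.Str.isIn a passage) then 1 else 0
  (passage, rec.2.2, passage_words, PySem.Str.split₀ (PySem.Str.strip rec.2.2),
   bDedup (spans.map Prod.fst), bDedup (spans.map Prod.snd), (spans.length : Int), label_y)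

-- 'records = [...]' then column projections and 'sum(r[6] for r in records)'
def snorm_batch_init_pre_alt (list_para : List String) (list_question : List String) (list_list_answer : List (List String)) (first_N : Int) : List String × List String × List (List String) × List (List String) × List (List Int) × List (List Int) × Int × List Int :=
  let records := (list_para.zip (list_list_answer.zip list_question)).map (bRecord first_N)
  (records.map (fun r => r.1), records.map (fun r => r.2.1),
   records.map (fun r => r.2.2.1), records.map (fun r => r.2.2.2.1),
   records.map (fun r => r.2.2.2.2.1), records.map (fun r => r.2.2.2.2.2.1),
   (records.map (fun r => r.2.2.2.2.2.2.1)).sum,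
   records.map (fun r => r.2.2.2.2.2.2.2))

-- ===== PRECONDITION & SPEC =====
-- hand-built DecidableEq for the output tuple (plain instance search exceeds its size limit here)
def pvDecEq2 : DecidableEq (Int × List Int) := instDecidableEqProd
def pvDecEq3 : DecidableEq (List (List Int) × Int × List Int) := @instDecidableEqProd _ _ (by infer_instance) pvDecEq2
def pvDecEq4 : DecidableEq (List (List Int) × List (List Int) × Int × List Int) := @instDecidableEqProd _ _ (by infer_instance) pvDecEq3
def pvDecEq5 : DecidableEq (List (List String) × List (List Int) × List (List Int) × Int × List Int) := @instDecidableEqProd _ _ (by infer_instance) pvDecEq4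
def pvDecEq6 : DecidableEq (List (List String) × List (List String) × List (List Int) × List (List Int) × Int × List Int) := @instDecidableEqProd _ _ (by infer_instance) pvDecEq5
def pvDecEq7 : DecidableEq (List String × List (List String) × List (List String) × List (List Int) × List (List Int) × Int × List Int) := @instDecidableEqProd _ _ (by infer_instance) pvDecEq6
def pvDecEq8 : DecidableEq (List String × List String × List (List String) × List (List String) × List (List Int) × List (List Int) × Int × List Int) := @instDecidableEqProd _ _ (by infer_instance) pvDecEq7

def Spec_snorm_batch_init_pre (list_para : List String) (list_question : List String) (list_list_answer : List (List String)) (first_N : Int) (out : List String × List String × List (List String) × List (List String) × List (List Int) × List (List Int) × Int × List Int) : Prop := out = snorm_batch_init_pre_alt list_para list_question list_list_answer first_N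
instance (list_para : List String) (list_question : List String) (list_list_answer : List (List String)) (first_N : Int) (out : List String × List String × List (List String) × List (List String) × List (List Int) × List (List Int) × Int × List Int) : Decidable (Spec_snorm_batch_init_pre list_para list_question list_list_answer first_N out) := by unfold Spec_snorm_batch_init_pre; exact pvDecEq8 _ _

-- ===== CLAIM (what is proved, stated in full; the proofs are below) =====
def Claim_equal_snorm_batch_init_pre : Prop := ∀ (list_para : List String) (list_question : List String) (list_list_answer : List (List String)) (first_N : Int), Dom_snorm_batch_init_pre list_para list_question list_list_answer first_N → Spec_snorm_batch_init_pre list_para list_question list_list_answer first_N (snorm_batch_init_pre list_para list_question list_list_answer first_N)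

-- ===== LEMMAS AND PROOFS =====

-- the order-preserving dedup step, as a named function for the invariants
def dStep (out : List Int) (x : Int) : List Int := if x ∈ out then out else out ++ [x]

lemma bDedup_eq (xs : List Int) : bDedup xs = xs.foldl dStep [] := rfl

-- all spans (start, end) collected over the answers, in A's visit order
def spansOf (pw : List String) (answers : List String) : List (Int × Int) :=
  answers.flatMap (fun answer =>
    let aw := PySem.Str.split₀ (PySem.Str.strip answer)
    (bMatches (bIndex pw) pw aw).map (fun i => (i, i + PySem.List.len aw - 1)))

-- a window matching a nonempty answer starts with the answer's first word
lemma slice_head (pw : List String) (w : String) (t : List String) (i : Int) (h0 : 0 ≤ i)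
    (h : PySem.List.slice pw (some i) (some (i + ((w :: t).length : Int))) = w :: t) :
    PySem.List.pyGetD pw i "" = w := by
  rw [PySem.List.slice_toNat pw h0 (by omega : (0:Int) ≤ i + ((w :: t).length : Int))] at h
  have h1 : ((pw.drop i.toNat).take ((i + ((w :: t).length : Int)).toNat - i.toNat)).head? = some w := by
    rw [h]; rfl
  rw [List.head?_take] at h1
  have h2 : pw[i.toNat]? = some w := by
    rw [← List.head?_drop]
    split at h1
    · exact absurd h1 (by simp)
    · exact h1
  rw [show i = ((i.toNat : Nat) : Int) from (Int.toNat_of_nonneg h0).symm,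
    PySem.List.pyGetD_natCast]
  rw [List.getD_eq_getElem?_getD, h2]
  rfl

-- a window reaching past the end of the passage cannot match a nonempty answer
lemma slice_long (pw ans : List String) (hne : ans ≠ []) (i : Int) (h0 : 0 ≤ i)
    (hN : (pw.length : Int) < i + (ans.length : Int)) :
    PySem.List.slice pw (some i) (some (i + (ans.length : Int))) ≠ ans := by
  intro h
  rw [PySem.List.slice_toNat pw h0 (by omega)] at h
  apply_fun List.length at h
  simp only [List.length_take, List.length_drop] at h
  have hl : 0 < ans.length := List.length_pos_iff.mpr hne
  omega

-- A's window scan may as well run over all positions: windows past len-L never match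
lemma filter_range_eq (pw ans : List String) (hne : ans ≠ []) :
    (PySem.List.pyRange 0 ((pw.length : Int) - (ans.length : Int) + 1) 1).filter
      (fun i => decide (PySem.List.slice pw (some i) (some (i + (ans.length : Int))) = ans))
    = (PySem.List.pyRange 0 (pw.length : Int) 1).filter
      (fun i => decide (PySem.List.slice pw (some i) (some (i + (ans.length : Int))) = ans)) := by
  have hL : 0 < ans.length := List.length_pos_iff.mpr hne
  by_cases hm : 0 ≤ (pw.length : Int) - (ans.length : Int) + 1
  · rw [PySem.List.pyRange_one_append 0 ((pw.length : Int) - (ans.length : Int) + 1) (pw.length : Int) hm (by omega)]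
    rw [List.filter_append]
    have h2 : (PySem.List.pyRange ((pw.length : Int) - (ans.length : Int) + 1) (pw.length : Int) 1).filter
        (fun i => decide (PySem.List.slice pw (some i) (some (i + (ans.length : Int))) = ans)) = [] := by
      apply List.filter_eq_nil_iff.mpr
      intro i hi
      rw [PySem.List.mem_pyRange_one] at hi
      simp only [decide_eq_true_eq]
      exact slice_long pw ans hne i (by omega) (by omega)
    rw [h2, List.append_nil]
  · rw [PySem.List.pyRange_one_eq_nil (by omega)]
    have h2 : (PySem.List.pyRange 0 (pw.length : Int) 1).filter
        (fun i => decide (PySem.List.slice pw (some i) (some (i + (ans.length : Int))) = ans)) = [] := by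
      apply List.filter_eq_nil_iff.mpr
      intro i hi
      rw [PySem.List.mem_pyRange_one] at hi
      simp only [decide_eq_true_eq]
      exact slice_long pw ans hne i (by omega) (by omega)
    rw [h2, List.filter_nil]

-- the inverted index looks up exactly the positions of w in passage_words
lemma bIndex_getD (pw : List String) (w : String) :
    (bIndex pw).getD w [] =
      (PySem.List.pyRange 0 (pw.length : Int) 1).filter
        (fun j => PySem.List.pyGetD pw j "" == w) := by
  unfold bIndex
  rw [show PySem.List.enumerate pw 0 = ((PySem.List.enumerate pw 0).map Prod.swap).map Prod.swap by
        simp [List.map_map]]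
  rw [List.foldl_map]
  simp only [Prod.fst_swap, Prod.snd_swap]
  rw [PySem.Dict.getD_foldl_modify_append]
  rw [List.filter_map]
  simp only [List.map_map, PySem.List.enumerate_eq_map_pyRange pw ""]
  rw [List.filter_map]
  simp only [List.map_map, Function.comp_def, Prod.snd_swap, Prod.fst_swap]
  simp [PySem.List.len_eq]

-- A's scan over all windows keeps exactly B's match list
lemma matches_eq (pw ans : List String) :
    (PySem.List.pyRange 0 (PySem.List.len pw - PySem.List.len ans + 1) 1).filter
      (fun i => decide (PySem.List.slice pw (some i) (some (i + PySem.List.len ans)) = ans))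
      = bMatches (bIndex pw) pw ans := by
  cases ans with
  | nil =>
    simp only [bMatches, PySem.List.len_eq, List.length_nil, Int.natCast_zero, sub_zero]
    apply List.filter_eq_self.mpr
    intro i hi
    rw [PySem.List.mem_pyRange_one] at hi
    simp only [decide_eq_true_eq]
    rw [PySem.List.slice_toNat pw hi.1 (by omega)]
    simp
  | cons w t =>
    simp only [bMatches, PySem.List.len_eq]
    rw [bIndex_getD, List.filter_filter]
    refine Eq.trans (filter_range_eq pw (w :: t) (by simp)) ?_
    apply List.filter_congr
    intro j hj
    rw [PySem.List.mem_pyRange_one] at hj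
    by_cases hc : PySem.List.slice pw (some j) (some (j + ((t.length : Int) + 1))) = w :: t
    · have hw : PySem.List.pyGetD pw j "" = w := slice_head pw w t j hj.1 (by exact_mod_cast hc)
      simp [hc, hw]
    · simp [hc]

-- the fold over a match list splits into independent start/end dedups and a count
lemma foldl3 (L : Int) (ms : List Int) : ∀ (s e : List Int) (c : Int),
    ms.foldl (fun st i =>
        ((if i ∈ st.1 then st.1 else st.1 ++ [i]),
         (if i + L - 1 ∈ st.2.1 then st.2.1 else st.2.1 ++ [i + L - 1]),
         st.2.2 + 1)) (s, e, c)
      = (ms.foldl dStep s, (ms.map (fun i => i + L - 1)).foldl dStep e, c + (ms.length : Int)) := by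
  induction ms with
  | nil => intro s e c; simp
  | cons m t ih =>
    intro s e c
    simp only [List.foldl_cons, List.map_cons, ih, dStep, List.length_cons]
    refine Prod.ext rfl (Prod.ext rfl ?_)
    push_cast
    ring

-- A's single conditional update, named
def f3 (L : Int) (st : List Int × List Int × Int) (i : Int) : List Int × List Int × Int :=
  ((if i ∈ st.1 then st.1 else st.1 ++ [i]),
   (if i + L - 1 ∈ st.2.1 then st.2.1 else st.2.1 ++ [i + L - 1]),
   st.2.2 + 1)

-- A's window scan is the unconditional fold over B's match list
lemma span_matches (pw ans : List String) (st : List Int × List Int × Int) :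
    aSpanLoop pw ans st = (bMatches (bIndex pw) pw ans).foldl (f3 (PySem.List.len ans)) st := by
  unfold aSpanLoop f3
  rw [← matches_eq, List.foldl_filter]
  simp only [decide_eq_true_eq]

-- A's window scan equals the split fold over B's match list
lemma span_eq (pw ans : List String) (s e : List Int) (c : Int) :
    aSpanLoop pw ans (s, e, c) =
      ((bMatches (bIndex pw) pw ans).foldl dStep s,
       ((bMatches (bIndex pw) pw ans).map (fun i => i + PySem.List.len ans - 1)).foldl dStep e,
       c + ((bMatches (bIndex pw) pw ans).length : Int)) := by
  rw [span_matches]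
  exact foldl3 (PySem.List.len ans) _ s e c

lemma yfold (passage : String) (answers : List String) : ∀ y : Int,
    answers.foldl (fun y a => if PySem.Str.isIn a passage then (1 : Int) else y) y
      = if answers.any (fun a => PySem.Str.isIn a passage) then 1 else y := by
  induction answers with
  | nil => intro y; simp
  | cons a t ih =>
    intro y
    rw [List.foldl_cons, ih, List.any_cons]
    cases h : PySem.Str.isIn a passage <;> simp

lemma map_fst_pairs (L : Int) (ms : List Int) :
    (ms.map (fun i => (i, i + L - 1))).map Prod.fst = ms := by
  simp [Function.comp_def]

lemma map_snd_pairs (L : Int) (ms : List Int) :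
    (ms.map (fun i => (i, i + L - 1))).map Prod.snd = ms.map (fun i => i + L - 1) := by
  simp

-- A's answer loop computed by the staged span list
lemma answers_fold (passage : String) (pw : List String) (answers : List String) :
    ∀ (s e : List Int) (c y : Int),
    answers.foldl (aAnswerStep passage pw) (s, e, c, y)
      = (((spansOf pw answers).map Prod.fst).foldl dStep s,
         ((spansOf pw answers).map Prod.snd).foldl dStep e,
         c + ((spansOf pw answers).length : Int),
         answers.foldl (fun y a => if PySem.Str.isIn a passage then (1 : Int) else y) y) := by
  induction answers with
  | nil =>
    intro s e c y
    simp only [List.foldl_nil, spansOf, List.flatMap_nil, List.map_nil, List.length_nil,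
      Int.natCast_zero, add_zero]
  | cons a t ih =>
    intro s e c y
    rw [List.foldl_cons]
    have ha : aAnswerStep passage pw (s, e, c, y) a =
        ((bMatches (bIndex pw) pw (PySem.Str.split₀ (PySem.Str.strip a))).foldl dStep s,
         ((bMatches (bIndex pw) pw (PySem.Str.split₀ (PySem.Str.strip a))).map
            (fun i => i + PySem.List.len (PySem.Str.split₀ (PySem.Str.strip a)) - 1)).foldl dStep e,
         c + ((bMatches (bIndex pw) pw (PySem.Str.split₀ (PySem.Str.strip a))).length : Int),
         if PySem.Str.isIn a passage then (1 : Int) else y) := by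
      simp only [aAnswerStep, span_eq]
    rw [ha, ih]
    simp only [spansOf, List.flatMap_cons, List.map_append, List.foldl_append,
      List.length_append, List.length_map, List.foldl_cons, map_fst_pairs, map_snd_pairs]
    refine Prod.ext rfl (Prod.ext rfl (Prod.ext ?_ rfl))
    push_cast
    ring

-- one step of A's outer loop, expressed through B's per-record function
lemma record_step (fN : Int) (st : SnormSt) (rec : String × List String × String) :
    aRecordStep fN st rec =
      (st.1 ++ [(bRecord fN rec).1],
       st.2.1 ++ [(bRecord fN rec).2.1],
       st.2.2.1 ++ [(bRecord fN rec).2.2.1],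
       st.2.2.2.1 ++ [(bRecord fN rec).2.2.2.1],
       st.2.2.2.2.1 ++ [(bRecord fN rec).2.2.2.2.1],
       st.2.2.2.2.2.1 ++ [(bRecord fN rec).2.2.2.2.2.1],
       st.2.2.2.2.2.2.1 + (bRecord fN rec).2.2.2.2.2.2.1,
       st.2.2.2.2.2.2.2.1 ++ [(bRecord fN rec).2.2.2.2.2.2.2],
       if PySem.List.len (PySem.Str.split₀ (PySem.Str.strip rec.1)) > fN
       then st.2.2.2.2.2.2.2.2 + 1 else st.2.2.2.2.2.2.2.2) := by
  simp only [aRecordStep, bRecord, answers_fold, yfold, bDedup_eq, spansOf]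

-- A's num_100 counter (dropped from the returned tuple)
def n100Step (fN : Int) (n : Int) (r : String × List String × String) : Int :=
  if PySem.List.len (PySem.Str.split₀ (PySem.Str.strip r.1)) > fN then n + 1 else n

-- A's whole outer fold equals B's map-then-project pipeline
lemma outer (fN : Int) (l : List (String × List String × String)) : ∀ st : SnormSt,
    l.foldl (aRecordStep fN) st =
      (st.1 ++ (l.map (bRecord fN)).map (fun r => r.1),
       st.2.1 ++ (l.map (bRecord fN)).map (fun r => r.2.1),
       st.2.2.1 ++ (l.map (bRecord fN)).map (fun r => r.2.2.1),
       st.2.2.2.1 ++ (l.map (bRecord fN)).map (fun r => r.2.2.2.1),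
       st.2.2.2.2.1 ++ (l.map (bRecord fN)).map (fun r => r.2.2.2.2.1),
       st.2.2.2.2.2.1 ++ (l.map (bRecord fN)).map (fun r => r.2.2.2.2.2.1),
       st.2.2.2.2.2.2.1 + ((l.map (bRecord fN)).map (fun r => r.2.2.2.2.2.2.1)).sum,
       st.2.2.2.2.2.2.2.1 ++ (l.map (bRecord fN)).map (fun r => r.2.2.2.2.2.2.2),
       l.foldl (n100Step fN) st.2.2.2.2.2.2.2.2) := by
  induction l with
  | nil => intro st; simp
  | cons r t ih =>
    intro st
    rw [List.foldl_cons, record_step, ih]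
    simp only [List.map_cons, List.sum_cons, List.foldl_cons, n100Step,
      List.append_assoc, List.singleton_append, add_assoc]

-- ===== VERDICT (by name: the statement is the Claim_ definition above) =====
theorem snorm_batch_init_pre_spec : Claim_equal_snorm_batch_init_pre := by
  intro lp lq lla fN _
  unfold Spec_snorm_batch_init_pre
  simp only [snorm_batch_init_pre, snorm_batch_init_pre_alt]
  rw [outer fN (lp.zip (lla.zip lq)) ([], [], [], [], [], [], 0, [], 0)]
  simp
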